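-- pv_equiv track=rewrite | github.com/Tokaido-Sanyou/Multiplayer-Tetris-Agent | local-multiplayer-tetris-main/localMultiplayerTetris/rl_utils/rnd_exploration.py | _get_approximate_piece_positions
-- ===== SOURCE A (Python) =====
-- def _get_approximate_piece_positions(rotation, x_pos, y_pos, piece_shape):
--     """
--     Get approximate positions where a piece would be placed
--     This is a simplified version - the actual piece shape depends on the piece type
--     """
--     positions = []
--
--     # Basic piece footprints (simplified)
--     if piece_shape == 0:  # I-piece
--         if rotation % 2 == 0:  # Horizontal
--             positions = [(y_pos, x_pos), (y_pos, x_pos+1), (y_pos, x_pos+2), (y_pos, x_pos+3)]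
--         else:  # Vertical
--             positions = [(y_pos, x_pos), (y_pos+1, x_pos), (y_pos+2, x_pos), (y_pos+3, x_pos)]
--     elif piece_shape == 1:  # O-piece
--         positions = [(y_pos, x_pos), (y_pos, x_pos+1), (y_pos+1, x_pos), (y_pos+1, x_pos+1)]
--     elif piece_shape == 2:  # T-piece
--         if rotation == 0:
--             positions = [(y_pos, x_pos-1), (y_pos, x_pos), (y_pos, x_pos+1), (y_pos+1, x_pos)]
--         elif rotation == 1:
--             positions = [(y_pos, x_pos), (y_pos+1, x_pos-1), (y_pos+1, x_pos), (y_pos+2, x_pos)]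
--         elif rotation == 2:
--             positions = [(y_pos, x_pos), (y_pos+1, x_pos-1), (y_pos+1, x_pos), (y_pos+1, x_pos+1)]
--         else:  # rotation == 3
--             positions = [(y_pos, x_pos), (y_pos+1, x_pos), (y_pos+1, x_pos+1), (y_pos+2, x_pos)]
--     else:  # Other pieces - simplified footprint
--         positions = [(y_pos, x_pos), (y_pos, x_pos+1), (y_pos+1, x_pos), (y_pos+1, x_pos+1)]
--
--     # Filter valid positions
--     valid_positions = [(r, c) for r, c in positions if 0 <= r < 20 and 0 <= c < 10]
--     return valid_positions
-- ===== SOURCE B (Python) =====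
-- def _get_approximate_piece_positions(rotation, x_pos, y_pos, piece_shape):
--     """Bitmask version: each footprint is one integer over a 4x5 grid
--     (bit b set means the cell at dy = b//5, dx = b%5 - 1 is occupied); the
--     result is produced by consuming the mask bit by bit, placing each set
--     cell and clipping it to the 20x10 board."""
--     if piece_shape == 0:  # I-piece: rotation parity picks the orientation
--         mask = 30 if rotation % 2 == 0 else 67650
--     elif piece_shape == 2:  # T-piece: rotations 0/1/2, anything else = rotation 3
--         mask = 71 if rotation == 0 else 2146 if rotation == 1 else \
--                226 if rotation == 2 else 2242
--     else:  # O-piece and every other shape: the 2x2 block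
--         mask = 198
--     out = []
--     b = 0
--     while mask:
--         if mask & 1:
--             r = y_pos + b // 5
--             c = x_pos + b % 5 - 1
--             if 0 <= r < 20 and 0 <= c < 10:
--                 out.append((r, c))
--         mask >>= 1
--         b += 1
--     return out
-- ===== Notes on version B (the rewrite author's own statement) =====
-- stated objective: alternative
-- what changed: Replaces the per-branch lists of absolute coordinate tuples with a single 20-bit integer bitmask per footprint over a 4x5 grid, decoded by a row-major bit scan that places and clips each set cell.
import Mathlib
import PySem

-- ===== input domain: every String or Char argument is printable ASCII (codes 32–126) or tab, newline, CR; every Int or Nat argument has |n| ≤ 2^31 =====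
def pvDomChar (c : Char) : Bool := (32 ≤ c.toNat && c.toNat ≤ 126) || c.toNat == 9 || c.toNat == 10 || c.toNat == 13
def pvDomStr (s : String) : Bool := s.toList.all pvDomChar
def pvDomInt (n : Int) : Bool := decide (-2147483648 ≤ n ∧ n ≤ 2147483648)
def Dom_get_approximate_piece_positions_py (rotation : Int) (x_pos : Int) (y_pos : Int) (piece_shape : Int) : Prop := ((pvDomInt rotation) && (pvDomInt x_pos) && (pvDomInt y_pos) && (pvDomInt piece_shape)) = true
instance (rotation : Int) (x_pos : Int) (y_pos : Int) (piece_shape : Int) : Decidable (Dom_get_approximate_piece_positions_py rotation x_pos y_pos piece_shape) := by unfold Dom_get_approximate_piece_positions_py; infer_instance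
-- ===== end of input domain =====

-- B encodes each footprint as one integer bitmask over a 4x5 grid and decodes it by consuming the mask bit by bit (objective: alternative).

-- ===== PORT A =====
-- Literal port of A: absolute position lists per branch, then a filter.
def get_approximate_piece_positions_py (rotation : Int) (x_pos : Int) (y_pos : Int) (piece_shape : Int) : List (Int × Int) :=
  let positions : List (Int × Int) :=
    if piece_shape == 0 then
      if PySem.Int.mod rotation 2 == 0 then
        [(y_pos, x_pos), (y_pos, x_pos+1), (y_pos, x_pos+2), (y_pos, x_pos+3)]
      else
        [(y_pos, x_pos), (y_pos+1, x_pos), (y_pos+2, x_pos), (y_pos+3, x_pos)]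
    else if piece_shape == 1 then
      [(y_pos, x_pos), (y_pos, x_pos+1), (y_pos+1, x_pos), (y_pos+1, x_pos+1)]
    else if piece_shape == 2 then
      if rotation == 0 then
        [(y_pos, x_pos-1), (y_pos, x_pos), (y_pos, x_pos+1), (y_pos+1, x_pos)]
      else if rotation == 1 then
        [(y_pos, x_pos), (y_pos+1, x_pos-1), (y_pos+1, x_pos), (y_pos+2, x_pos)]
      else if rotation == 2 then
        [(y_pos, x_pos), (y_pos+1, x_pos-1), (y_pos+1, x_pos), (y_pos+1, x_pos+1)]
      else
        [(y_pos, x_pos), (y_pos+1, x_pos), (y_pos+1, x_pos+1), (y_pos+2, x_pos)]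
    else
      [(y_pos, x_pos), (y_pos, x_pos+1), (y_pos+1, x_pos), (y_pos+1, x_pos+1)]
  positions.filter (fun rc => decide (0 ≤ rc.1 ∧ rc.1 < 20 ∧ 0 ≤ rc.2 ∧ rc.2 < 10))

-- ===== PORT B =====
-- Source B's while loop: consume the mask one bit per step (bit b = cell dy = b/5, dx = b%5 - 1),
-- placing each set cell and clipping it to the 20x10 board; terminates because the mask halves.
def pvScan (x_pos y_pos : Int) (mask b : Nat) (out : List (Int × Int)) : List (Int × Int) :=
  if mask = 0 then out
  else
    let out' :=
      if mask % 2 = 1 then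
        let r : Int := y_pos + (b / 5 : Nat)
        let c : Int := x_pos + (b % 5 : Nat) - 1
        if 0 ≤ r ∧ r < 20 ∧ 0 ≤ c ∧ c < 10 then out ++ [(r, c)] else out
      else out
    pvScan x_pos y_pos (mask / 2) (b + 1) out'
termination_by mask
decreasing_by exact Nat.div_lt_self (Nat.pos_of_ne_zero (by assumption)) (by omega)

-- Port of B: select the footprint bitmask, then scan it.
def get_approximate_piece_positions_py_alt (rotation : Int) (x_pos : Int) (y_pos : Int) (piece_shape : Int) : List (Int × Int) :=
  let mask : Nat :=
    if piece_shape == 0 then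
      if PySem.Int.mod rotation 2 == 0 then 30 else 67650
    else if piece_shape == 2 then
      if rotation == 0 then 71 else if rotation == 1 then 2146
      else if rotation == 2 then 226 else 2242
    else 198
  pvScan x_pos y_pos mask 0 []

-- ===== PRECONDITION & SPEC =====
def Spec_get_approximate_piece_positions_py (rotation : Int) (x_pos : Int) (y_pos : Int) (piece_shape : Int) (out : List (Int × Int)) : Prop := out = get_approximate_piece_positions_py_alt rotation x_pos y_pos piece_shape
instance (rotation : Int) (x_pos : Int) (y_pos : Int) (piece_shape : Int) (out : List (Int × Int)) : Decidable (Spec_get_approximate_piece_positions_py rotation x_pos y_pos piece_shape out) := by unfold Spec_get_approximate_piece_positions_py; infer_instance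

-- ===== CLAIM (what is proved, stated in full; the proofs are below) =====
def Claim_equal_get_approximate_piece_positions_py : Prop := ∀ (rotation : Int) (x_pos : Int) (y_pos : Int) (piece_shape : Int), Dom_get_approximate_piece_positions_py rotation x_pos y_pos piece_shape → Spec_get_approximate_piece_positions_py rotation x_pos y_pos piece_shape (get_approximate_piece_positions_py rotation x_pos y_pos piece_shape)

-- ===== LEMMAS AND PROOFS =====
-- Decode a mask into the (dy, dx) offsets of its set bits (proof helper only).
def pvDecode (mask b : Nat) : List (Int × Int) :=
  if mask = 0 then []
  else (if mask % 2 = 1 then [(((b / 5 : Nat) : Int), ((b % 5 : Nat) : Int) - 1)] else [])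
       ++ pvDecode (mask / 2) (b + 1)
termination_by mask
decreasing_by exact Nat.div_lt_self (Nat.pos_of_ne_zero (by assumption)) (by omega)

-- Place a list of offsets and keep the cells on the board (proof helper only).
def pvClip (x_pos y_pos : Int) (ds : List (Int × Int)) : List (Int × Int) :=
  ds.filterMap (fun d =>
    if 0 ≤ y_pos + d.1 ∧ y_pos + d.1 < 20 ∧ 0 ≤ x_pos + d.2 ∧ x_pos + d.2 < 10 then
      some (y_pos + d.1, x_pos + d.2)
    else none)

-- The bit scan equals placing-and-clipping the decoded offsets (loop invariant of pvScan).
theorem pvScan_clip (x_pos y_pos : Int) : ∀ (mask b : Nat) (out : List (Int × Int)),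
    pvScan x_pos y_pos mask b out = out ++ pvClip x_pos y_pos (pvDecode mask b) := by
  intro mask
  induction mask using Nat.strong_induction_on with
  | _ mask ih =>
    intro b out
    rw [pvScan, pvDecode]
    by_cases h0 : mask = 0
    · simp [h0, pvClip]
    · have hlt : mask / 2 < mask := Nat.div_lt_self (Nat.pos_of_ne_zero h0) (by omega)
      rw [if_neg h0, if_neg h0, ih (mask / 2) hlt]
      unfold pvClip
      rw [List.filterMap_append, ← List.append_assoc]
      congr 1
      by_cases hb : mask % 2 = 1
      · rw [if_pos hb, if_pos hb]
        simp only [List.filterMap_cons, List.filterMap_nil]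
        have hc : x_pos + (((b % 5 : Nat) : Int) - 1) = x_pos + ((b % 5 : Nat) : Int) - 1 := by ring
        split_ifs
        all_goals try (exfalso; omega)
        all_goals simp
        all_goals omega
      · rw [if_neg hb, if_neg hb]
        simp

-- Filtering an absolute-position list equals placing-and-clipping the corresponding offsets.
theorem pvFilterMapKey (x_pos y_pos : Int) (ds : List (Int × Int)) :
    (ds.map (fun d => (y_pos + d.1, x_pos + d.2))).filter
      (fun rc => decide (0 ≤ rc.1 ∧ rc.1 < 20 ∧ 0 ≤ rc.2 ∧ rc.2 < 10))
    = pvClip x_pos y_pos ds := by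
  unfold pvClip
  induction ds with
  | nil => rfl
  | cons d t ihd =>
    by_cases h : 0 ≤ y_pos + d.1 ∧ y_pos + d.1 < 20 ∧ 0 ≤ x_pos + d.2 ∧ x_pos + d.2 < 10 <;>
      simp only [List.map_cons, List.filter_cons, List.filterMap_cons, ihd] <;> simp [h]

-- One lemma per footprint mask: A's filtered absolute list equals B's bit scan of that mask.
theorem pvBranch_30 (x_pos y_pos : Int) :
    ([(y_pos, x_pos), (y_pos, x_pos+1), (y_pos, x_pos+2), (y_pos, x_pos+3)] : List (Int × Int)).filter
      (fun rc => decide (0 ≤ rc.1 ∧ rc.1 < 20 ∧ 0 ≤ rc.2 ∧ rc.2 < 10))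
    = pvScan x_pos y_pos 30 0 [] := by
  rw [pvScan_clip, show pvDecode 30 0 = [(0, 0), (0, 1), (0, 2), (0, 3)] from by simp [pvDecode],
    List.nil_append]
  simpa using pvFilterMapKey x_pos y_pos [(0, 0), (0, 1), (0, 2), (0, 3)]

theorem pvBranch_67650 (x_pos y_pos : Int) :
    ([(y_pos, x_pos), (y_pos+1, x_pos), (y_pos+2, x_pos), (y_pos+3, x_pos)] : List (Int × Int)).filter
      (fun rc => decide (0 ≤ rc.1 ∧ rc.1 < 20 ∧ 0 ≤ rc.2 ∧ rc.2 < 10))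
    = pvScan x_pos y_pos 67650 0 [] := by
  rw [pvScan_clip, show pvDecode 67650 0 = [(0, 0), (1, 0), (2, 0), (3, 0)] from by simp [pvDecode],
    List.nil_append]
  simpa using pvFilterMapKey x_pos y_pos [(0, 0), (1, 0), (2, 0), (3, 0)]

theorem pvBranch_198 (x_pos y_pos : Int) :
    ([(y_pos, x_pos), (y_pos, x_pos+1), (y_pos+1, x_pos), (y_pos+1, x_pos+1)] : List (Int × Int)).filter
      (fun rc => decide (0 ≤ rc.1 ∧ rc.1 < 20 ∧ 0 ≤ rc.2 ∧ rc.2 < 10))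
    = pvScan x_pos y_pos 198 0 [] := by
  rw [pvScan_clip, show pvDecode 198 0 = [(0, 0), (0, 1), (1, 0), (1, 1)] from by simp [pvDecode],
    List.nil_append]
  simpa using pvFilterMapKey x_pos y_pos [(0, 0), (0, 1), (1, 0), (1, 1)]

theorem pvBranch_71 (x_pos y_pos : Int) :
    ([(y_pos, x_pos-1), (y_pos, x_pos), (y_pos, x_pos+1), (y_pos+1, x_pos)] : List (Int × Int)).filter
      (fun rc => decide (0 ≤ rc.1 ∧ rc.1 < 20 ∧ 0 ≤ rc.2 ∧ rc.2 < 10))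
    = pvScan x_pos y_pos 71 0 [] := by
  rw [pvScan_clip, show pvDecode 71 0 = [(0, -1), (0, 0), (0, 1), (1, 0)] from by simp [pvDecode],
    List.nil_append]
  simpa [sub_eq_add_neg] using pvFilterMapKey x_pos y_pos [(0, -1), (0, 0), (0, 1), (1, 0)]

theorem pvBranch_2146 (x_pos y_pos : Int) :
    ([(y_pos, x_pos), (y_pos+1, x_pos-1), (y_pos+1, x_pos), (y_pos+2, x_pos)] : List (Int × Int)).filter
      (fun rc => decide (0 ≤ rc.1 ∧ rc.1 < 20 ∧ 0 ≤ rc.2 ∧ rc.2 < 10))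
    = pvScan x_pos y_pos 2146 0 [] := by
  rw [pvScan_clip, show pvDecode 2146 0 = [(0, 0), (1, -1), (1, 0), (2, 0)] from by simp [pvDecode],
    List.nil_append]
  simpa [sub_eq_add_neg] using pvFilterMapKey x_pos y_pos [(0, 0), (1, -1), (1, 0), (2, 0)]

theorem pvBranch_226 (x_pos y_pos : Int) :
    ([(y_pos, x_pos), (y_pos+1, x_pos-1), (y_pos+1, x_pos), (y_pos+1, x_pos+1)] : List (Int × Int)).filter
      (fun rc => decide (0 ≤ rc.1 ∧ rc.1 < 20 ∧ 0 ≤ rc.2 ∧ rc.2 < 10))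
    = pvScan x_pos y_pos 226 0 [] := by
  rw [pvScan_clip, show pvDecode 226 0 = [(0, 0), (1, -1), (1, 0), (1, 1)] from by simp [pvDecode],
    List.nil_append]
  simpa [sub_eq_add_neg] using pvFilterMapKey x_pos y_pos [(0, 0), (1, -1), (1, 0), (1, 1)]

theorem pvBranch_2242 (x_pos y_pos : Int) :
    ([(y_pos, x_pos), (y_pos+1, x_pos), (y_pos+1, x_pos+1), (y_pos+2, x_pos)] : List (Int × Int)).filter
      (fun rc => decide (0 ≤ rc.1 ∧ rc.1 < 20 ∧ 0 ≤ rc.2 ∧ rc.2 < 10))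
    = pvScan x_pos y_pos 2242 0 [] := by
  rw [pvScan_clip, show pvDecode 2242 0 = [(0, 0), (1, 0), (1, 1), (2, 0)] from by simp [pvDecode],
    List.nil_append]
  simpa using pvFilterMapKey x_pos y_pos [(0, 0), (1, 0), (1, 1), (2, 0)]

-- ===== VERDICT (by name: the statement is the Claim_ definition above) =====
theorem get_approximate_piece_positions_py_spec : Claim_equal_get_approximate_piece_positions_py := by
  intro rotation x_pos y_pos piece_shape _
  unfold Spec_get_approximate_piece_positions_py
  unfold get_approximate_piece_positions_py get_approximate_piece_positions_py_alt
  split_ifs <;>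
    first
      | (exfalso; simp only [beq_iff_eq] at *; omega)
      | exact pvBranch_30 x_pos y_pos
      | exact pvBranch_67650 x_pos y_pos
      | exact pvBranch_198 x_pos y_pos
      | exact pvBranch_71 x_pos y_pos
      | exact pvBranch_2146 x_pos y_pos
      | exact pvBranch_226 x_pos y_pos
      | exact pvBranch_2242 x_pos y_pos
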